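-- pv_equiv track=rewrite | github.com/Anders-E/Kattis | toilet/toilet.py | toilet
-- ===== SOURCE A (Python) =====
-- def toilet(prefs, policy):
--     adjustments = 0
--     state = prefs[0]
--
--     for pref in prefs[1:]:
--         if pref != state:
--             adjustments += 1
--             state = pref
--         if state != policy and policy != "W":
--             adjustments += 1
--             state = policy
--
--     return adjustments
-- ===== SOURCE B (Python) =====
-- def toilet(prefs, policy):
--     first = prefs[0]
--     if policy == "W":
--         seq = prefs
--     else:
--         seq = [first]
--         for pref in prefs[1:]:
--             seq.append(pref)
--             seq.append(policy)
--     return sum(1 for a, b in zip(seq, seq[1:]) if a != b)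
-- ===== Notes on version B (the rewrite author's own statement) =====
-- stated objective: alternative
-- what changed: Instead of A's single stateful pass (tracking current seat state and two conditional adjustments per preference), B builds the desired-position sequence (prefs itself for policy 'W', otherwise prefs[0] followed by each later pref interleaved with the policy position) and returns the count of adjacent differing pairs.
import Mathlib
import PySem

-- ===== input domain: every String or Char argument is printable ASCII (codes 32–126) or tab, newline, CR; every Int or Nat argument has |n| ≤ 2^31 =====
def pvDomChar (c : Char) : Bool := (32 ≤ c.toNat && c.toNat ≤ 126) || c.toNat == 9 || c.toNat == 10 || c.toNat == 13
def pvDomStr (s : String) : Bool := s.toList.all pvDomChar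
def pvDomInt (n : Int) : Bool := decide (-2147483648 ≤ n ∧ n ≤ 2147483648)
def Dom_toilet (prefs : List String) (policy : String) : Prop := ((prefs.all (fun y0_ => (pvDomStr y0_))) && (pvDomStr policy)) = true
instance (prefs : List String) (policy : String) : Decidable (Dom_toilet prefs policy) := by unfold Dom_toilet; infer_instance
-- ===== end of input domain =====

-- B replaces A's stateful single pass by building the desired-position sequence and counting
-- adjacent differences (alternative decomposition, same cost).


-- ===== PORT A =====
-- A's loop body: the two conditional adjustments, on state (adjustments, state)
def stepA (policy : String) (acc : Int × String) (pref : String) : Int × String :=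
  let acc := if pref ≠ acc.2 then (acc.1 + 1, pref) else acc
  if acc.2 ≠ policy ∧ policy ≠ "W" then (acc.1 + 1, policy) else acc

def toilet (prefs : List String) (policy : String) : Int :=
  -- state = prefs[0]  (IndexError on empty prefs, excluded by Pre_)
  let state := (PySem.List.pyGet? prefs 0).getD ""
  let r := (PySem.List.slice prefs (some 1) none).foldl (stepA policy) (0, state)
  r.1

-- ===== PORT B =====
-- B's adjacent-difference count: sum(1 for a, b in zip(seq, seq[1:]) if a != b)
def adjCount0 (seq : List String) : Int :=
  (seq.zip (PySem.List.slice seq (some 1) none)).foldl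
    (fun (n : Int) ab => if ab.1 ≠ ab.2 then n + 1 else n) 0

def toilet_alt (prefs : List String) (policy : String) : Int :=
  let first := (PySem.List.pyGet? prefs 0).getD ""
  let seq : List String :=
    if policy = "W" then prefs
    else (PySem.List.slice prefs (some 1) none).foldl
      (fun acc pref => acc ++ [pref, policy]) [first]
  adjCount0 seq

-- ===== PRECONDITION & SPEC =====
-- A raises IndexError on empty prefs (prefs[0]); nothing else raises.
def Pre_toilet (prefs : List String) (policy : String) : Prop := prefs ≠ []
instance (prefs : List String) (policy : String) : Decidable (Pre_toilet prefs policy) := by unfold Pre_toilet; infer_instance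
def pvWitness_toilet : List String × String := (["U", "D"], "U")

def Spec_toilet (prefs : List String) (policy : String) (out : Int) : Prop := out = toilet_alt prefs policy
instance (prefs : List String) (policy : String) (out : Int) : Decidable (Spec_toilet prefs policy out) := by unfold Spec_toilet; infer_instance

-- ===== CLAIM (what is proved, stated in full; the proofs are below) =====
def Claim_equal_toilet : Prop := ∀ (prefs : List String) (policy : String), Dom_toilet prefs policy → Pre_toilet prefs policy → Spec_toilet prefs policy (toilet prefs policy)

-- ===== LEMMAS AND PROOFS =====

-- adjacent-difference count with a general accumulator (proof generalisation of adjCount0)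
def adjCount (seq : List String) (n : Int) : Int :=
  (seq.zip seq.tail).foldl (fun (n : Int) ab => if ab.1 ≠ ab.2 then n + 1 else n) n

theorem adjCount0_eq (seq : List String) : adjCount0 seq = adjCount seq 0 := by
  simp [adjCount0, adjCount, PySem.List.slice_from_one]

theorem adjCount_cons_cons (x y : String) (l : List String) (n : Int) :
    adjCount (x :: y :: l) n = adjCount (y :: l) (if x ≠ y then n + 1 else n) := by
  simp [adjCount, List.foldl]

-- W case: A's fold counts adjacent differences of state :: rest
theorem foldW (policy : String) (hW : policy = "W") (rest : List String) :
    ∀ (a : Int) (s : String),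
      (rest.foldl (stepA policy) (a, s)).1 = adjCount (s :: rest) a := by
  induction rest with
  | nil => intro a s; simp [adjCount]
  | cons q rest ih =>
    intro a s
    rw [adjCount_cons_cons]
    have hstep : stepA policy (a, s) q = (if s ≠ q then a + 1 else a, q) := by
      subst hW
      by_cases h : q = s
      · subst h; simp [stepA]
      · have h' : ¬ s = q := fun e => h e.symm
        simp [stepA, h, h']
    simp only [List.foldl, hstep, ih]

-- non-W case: A's fold counts adjacent differences of s :: rest.flatMap [q, policy]
theorem foldNW (policy : String) (hW : policy ≠ "W") (rest : List String) :
    ∀ (a : Int) (s : String),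
      (rest.foldl (stepA policy) (a, s)).1
        = adjCount (s :: rest.flatMap (fun q => [q, policy])) a := by
  induction rest with
  | nil => intro a s; simp [adjCount]
  | cons q rest ih =>
    intro a s
    have hstep : stepA policy (a, s) q
        = ((if s ≠ q then a + 1 else a) + (if q ≠ policy then 1 else 0), policy) := by
      by_cases h1 : q = s
      · subst h1
        by_cases h2 : q = policy <;> simp [stepA, h2, hW]
      · have h1' : ¬ s = q := fun h => h1 h.symm
        by_cases h2 : q = policy
        · subst h2; simp [stepA, h1, h1']
        · simp [stepA, h1, h1', h2, hW]
    simp only [List.flatMap_cons, List.cons_append]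
    rw [adjCount_cons_cons, adjCount_cons_cons]
    simp only [List.foldl, hstep, ih]
    congr 1
    by_cases h1 : s = q <;> by_cases h2 : q = policy <;> simp [h1, h2] <;> ring

-- ===== VERDICT (by name: the statement is the Claim_ definition above) =====
theorem toilet_spec : Claim_equal_toilet := by
  intro prefs policy _ hpre
  unfold Spec_toilet
  match prefs with
  | [] => exact absurd rfl hpre
  | p :: rest =>
    unfold toilet toilet_alt
    simp only [PySem.List.slice_from_one, List.tail_cons, PySem.List.pyGet?_zero_cons,
      Option.getD_some, adjCount0_eq]
    by_cases hW : policy = "W"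
    · rw [if_pos hW, foldW policy hW rest 0 p]
    · rw [if_neg hW, foldNW policy hW rest 0 p,
        PySem.List.foldl_append_eq_flatMap (fun q => [q, policy]) rest [p]]
      rfl
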